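-- pv_equiv track=rewrite | github.com/gh0stintheshe11/LeetCode-Solutions | solutions/1308.smallest-string-with-swaps/Python3.py | smallestStringWithSwaps
-- ===== SOURCE A (Python) =====
-- from typing import List
-- from collections import defaultdict
--
-- def smallestStringWithSwaps(s: str, pairs: List[List[int]]) -> str:
--     parent = list(range(len(s)))
--
--     def find(x):
--         if parent[x] != x:
--             parent[x] = find(parent[x])
--         return parent[x]
--
--     def union(x, y):
--         rootX = find(x)
--         rootY = find(y)
--         if rootX != rootY:
--             parent[rootY] = rootX
--
--     for a, b in pairs:
--         union(a, b)
--
--     components = defaultdict(list)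
--     for i in range(len(s)):
--         root = find(i)
--         components[root].append(i)
--
--     res = list(s)
--     for indices in components.values():
--         chars = sorted(res[i] for i in indices)
--         for i, ch in zip(sorted(indices), chars):
--             res[i] = ch
--
--     return ''.join(res)
-- ===== SOURCE B (Python) =====
-- def smallestStringWithSwaps(s, pairs):
--     # merge-by-relabel: keep a flat component label per index, no trees/recursion
--     rep = list(range(len(s)))
--     for a, b in pairs:
--         ra, rb = rep[a], rep[b]
--         if ra != rb:
--             rep = [ra if r == rb else r for r in rep]
--     comp = {}
--     for i, r in enumerate(rep):
--         comp[r] = comp.get(r, []) + [i]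
--     res = list(s)
--     for indices in comp.values():
--         chars = sorted(res[j] for j in indices)
--         for i, ch in zip(indices, chars):
--             res[i] = ch
--     return ''.join(res)
-- ===== Notes on version B (the rewrite author's own statement) =====
-- stated objective: simpler
-- what changed: A's recursive union-find with path compression is replaced by a flat component-label list that is eagerly relabelled on each merging pair (no trees, no recursion), followed by the same group-and-sort rewrite driven by the labels instead of find().
import Mathlib
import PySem

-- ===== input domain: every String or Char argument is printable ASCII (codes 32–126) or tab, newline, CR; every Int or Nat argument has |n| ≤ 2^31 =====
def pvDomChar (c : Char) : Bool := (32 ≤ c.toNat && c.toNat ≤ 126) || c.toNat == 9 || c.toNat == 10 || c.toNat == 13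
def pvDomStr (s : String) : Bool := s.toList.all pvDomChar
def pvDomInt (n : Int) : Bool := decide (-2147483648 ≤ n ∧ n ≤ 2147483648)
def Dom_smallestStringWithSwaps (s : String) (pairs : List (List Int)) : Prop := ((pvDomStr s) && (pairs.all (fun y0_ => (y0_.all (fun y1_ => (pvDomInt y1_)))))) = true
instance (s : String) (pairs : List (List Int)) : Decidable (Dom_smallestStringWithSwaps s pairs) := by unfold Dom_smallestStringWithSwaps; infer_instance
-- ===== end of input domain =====

-- B replaces A's recursive union-find (path compression) with a flat per-index component label
-- that is relabelled on each merging pair; same return value, no recursion and no trees.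

-- ===== PORT A =====
-- find(x) with path compression; Python's unbounded recursion is ported with fuel
-- (parent.length + 2 always suffices on the parent forests this algorithm builds; proved below).
-- The `none` branch of pyGet? is Python's IndexError, excluded by Pre_.
def pvFindA : Nat → List Int → Int → List Int × Int
  | 0, parent, x => (parent, x)
  | fuel+1, parent, x =>
    match PySem.List.pyGet? parent x with
    | none => (parent, x)
    | some p =>
      if p ≠ x then
        let q := pvFindA fuel parent p
        (PySem.List.pySetD q.1 x q.2, q.2)
      else (parent, x)

def pvUnionA (parent : List Int) (x y : Int) : List Int :=
  let f1 := pvFindA (parent.length + 2) parent x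
  let f2 := pvFindA (f1.1.length + 2) f1.1 y
  if f1.2 ≠ f2.2 then PySem.List.pySetD f2.1 f2.2 f1.2 else f2.1

-- one loop iteration 'a, b = pr; union(a, b)' (a row that is not [a, b] raises ValueError: outside Pre_)
def pvUnionRow (parent : List Int) (pr : List Int) : List Int :=
  match pr with
  | [a, b] => pvUnionA parent a b
  | _ => parent

def smallestStringWithSwaps (s : String) (pairs : List (List Int)) : String :=
  let parent0 : List Int := PySem.List.pyRange 0 (PySem.Str.len s) 1
  let parent1 := pairs.foldl pvUnionRow parent0
  let st := (PySem.List.pyRange 0 (PySem.Str.len s) 1).foldl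
      (fun (st : List Int × PySem.Dict Int (List Int)) i =>
        let fr := pvFindA (st.1.length + 2) st.1 i
        (fr.1, st.2.modify fr.2 [] (fun v => v ++ [i])))
      (parent1, PySem.Dict.empty)
  let res := st.2.values.foldl (fun res indices =>
      let chars := PySem.List.sorted (indices.map (fun i => PySem.List.pyGetD res i ' ')) (fun c => c)
      ((PySem.List.sorted indices (fun i => i)).zip chars).foldl
        (fun res p => PySem.List.pySetD res p.1 p.2) res) s.toList
  String.ofList res

-- ===== PORT B =====
def smallestStringWithSwaps_alt (s : String) (pairs : List (List Int)) : String :=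
  let rep0 : List Int := PySem.List.pyRange 0 (PySem.Str.len s) 1
  let rep := pairs.foldl (fun rep pr =>
    match pr with
    | [a, b] =>
      match PySem.List.pyGet? rep a, PySem.List.pyGet? rep b with
      | some ra, some rb =>
        if ra ≠ rb then rep.map (fun r => if r = rb then ra else r) else rep
      | _, _ => rep
    | _ => rep) rep0
  let comp := (PySem.List.enumerate rep).foldl
      (fun (d : PySem.Dict Int (List Int)) p => d.modify p.2 [] (fun v => v ++ [p.1]))
      PySem.Dict.empty
  let res := comp.values.foldl (fun res indices =>
      let chars := PySem.List.sorted (indices.map (fun j => PySem.List.pyGetD res j ' ')) (fun c => c)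
      (indices.zip chars).foldl (fun res p => PySem.List.pySetD res p.1 p.2) res) s.toList
  String.ofList res

-- ===== PRECONDITION & SPEC =====
-- Pre_ admits exactly the inputs on which the Python A returns: every pair must be a 2-element
-- row of valid (possibly negative, Python-wraparound) indices into s; otherwise A raises
-- ValueError (unpacking) or IndexError.
def Pre_smallestStringWithSwaps (s : String) (pairs : List (List Int)) : Prop :=
  ∀ pr ∈ pairs, pr.length = 2 ∧ ∀ x ∈ pr, PySem.Raise.InRange s.length x
instance (s : String) (pairs : List (List Int)) : Decidable (Pre_smallestStringWithSwaps s pairs) := by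
  unfold Pre_smallestStringWithSwaps; infer_instance
def pvWitness_smallestStringWithSwaps : String × List (List Int) := ("dcab", [[0, 3], [1, 2]])
def Spec_smallestStringWithSwaps (s : String) (pairs : List (List Int)) (out : String) : Prop := out = smallestStringWithSwaps_alt s pairs
instance (s : String) (pairs : List (List Int)) (out : String) : Decidable (Spec_smallestStringWithSwaps s pairs out) := by unfold Spec_smallestStringWithSwaps; infer_instance

-- ===== CLAIM (what is proved, stated in full; the proofs are below) =====
def Claim_equal_smallestStringWithSwaps : Prop := ∀ (s : String) (pairs : List (List Int)), Dom_smallestStringWithSwaps s pairs → Pre_smallestStringWithSwaps s pairs → Spec_smallestStringWithSwaps s pairs (smallestStringWithSwaps s pairs)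

-- ===== LEMMAS AND PROOFS =====

def pvRoot : Nat → List Int → Nat → Int
  | 0, _, j => (j : Int)
  | fuel+1, P, j =>
    match PySem.List.pyGet? P (j : Int) with
    | none => (j : Int)
    | some p => if p = (j : Int) then (j : Int) else pvRoot fuel P p.toNat

def pvRootT (P : List Int) (j : Nat) : Int := pvRoot (P.length + 1) P j

def pvValid (n : Nat) (P : List Int) : Prop :=
  P.length = n ∧ ∀ p ∈ P, 0 ≤ p ∧ p < (n : Int)

def pvMeas (w : Nat → Nat) (P : List Int) : Prop :=
  ∀ j : Nat, (h : j < P.length) → P[j] ≠ (j : Int) → w P[j].toNat < w j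

def pvCB (w : Nat → Nat) (n j : Nat) : Nat := ((Finset.range n).filter (fun i => w i < w j)).card

def pvNorm (n : Nat) (x : Int) : Nat := if 0 ≤ x then x.toNat else n - (-x).toNat

-- basic facts
theorem pvValid_getElem {n : Nat} {P : List Int} (hv : pvValid n P) {j : Nat} (h : j < P.length) :
    0 ≤ P[j] ∧ P[j] < (n : Int) := hv.2 _ (List.getElem_mem h)

theorem pvValid_getElem_toNat_lt {n : Nat} {P : List Int} (hv : pvValid n P) {j : Nat} (h : j < P.length) :
    P[j].toNat < n := by
  have := pvValid_getElem hv h; omega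

theorem pvGet_nat {P : List Int} {j : Nat} (h : j < P.length) :
    PySem.List.pyGet? P (j : Int) = some P[j] := by
  rw [PySem.List.pyGet?_natCast]; exact List.getElem?_eq_getElem h

theorem pvCB_le {w : Nat → Nat} {n j : Nat} : pvCB w n j ≤ n := by
  have := Finset.card_filter_le (Finset.range n) (fun i => w i < w j)
  simpa [pvCB] using this

theorem pvCB_lt_of_lt {w : Nat → Nat} {n j k : Nat} (hk : k < n) (hw : w k < w j) :
    pvCB w n k < pvCB w n j := by
  apply Finset.card_lt_card
  constructor
  · intro i hi
    simp only [Finset.mem_filter, Finset.mem_range] at hi ⊢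
    exact ⟨hi.1, hi.2.trans hw⟩
  · intro hsub
    have := hsub (by simp only [Finset.mem_filter, Finset.mem_range]; exact ⟨hk, hw⟩)
    simp only [Finset.mem_filter] at this
    omega

-- fuel irrelevance for pvRoot
theorem pvRoot_fuel {n : Nat} {P : List Int} {w : Nat → Nat} (hv : pvValid n P) (hm : pvMeas w P) :
    ∀ c j f g, pvCB w n j = c → j < n → pvCB w n j < f → pvCB w n j < g →
      pvRoot f P j = pvRoot g P j := by
  intro c
  induction c using Nat.strong_induction_on with
  | _ c IH =>
    intro j f g hc hj hf hg
    obtain ⟨f, rfl⟩ : ∃ f', f = f' + 1 := ⟨f - 1, by omega⟩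
    obtain ⟨g, rfl⟩ : ∃ g', g = g' + 1 := ⟨g - 1, by omega⟩
    have hjP : j < P.length := by rw [hv.1]; exact hj
    simp only [pvRoot, pvGet_nat hjP]
    by_cases hfix : (P[j]'hjP) = (j : Int)
    · simp [hfix]
    · simp only [hfix, if_neg hfix]
      have hkn : (P[j]'hjP).toNat < n := pvValid_getElem_toNat_lt hv hjP
      have hwk : w (P[j]'hjP).toNat < w j := hm j hjP hfix
      have hck : pvCB w n (P[j]'hjP).toNat < pvCB w n j := pvCB_lt_of_lt hkn hwk
      exact IH _ (hc ▸ hck) _ f g rfl hkn (by omega) (by omega)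

theorem pvRootT_eq_fuel {n : Nat} {P : List Int} {w : Nat → Nat} (hv : pvValid n P) (hm : pvMeas w P)
    {j : Nat} (hj : j < n) {f : Nat} (hf : pvCB w n j < f) :
    pvRoot f P j = pvRootT P j := by
  have hle : pvCB w n j < P.length + 1 := by
    have := pvCB_le (w := w) (n := n) (j := j); have := hv.1; omega
  exact pvRoot_fuel hv hm _ j f (P.length + 1) rfl hj hf hle

theorem pvRootT_step {n : Nat} {P : List Int} {w : Nat → Nat} (hv : pvValid n P) (hm : pvMeas w P)
    {j : Nat} (hj : j < n) (hjP : j < P.length) (hfix : (P[j]'hjP) ≠ (j : Int)) :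
    pvRootT P j = pvRootT P (P[j]'hjP).toNat := by
  have hkn : (P[j]'hjP).toNat < n := pvValid_getElem_toNat_lt hv hjP
  have hck : pvCB w n (P[j]'hjP).toNat < pvCB w n j := pvCB_lt_of_lt hkn (hm j hjP hfix)
  have h1 : pvRootT P j = pvRoot (P.length + 1) P j := rfl
  rw [h1]
  have hcb : pvCB w n j < P.length + 1 := by
    have := pvCB_le (w := w) (n := n) (j := j); have := hv.1; omega
  conv_lhs => rw [pvRoot, pvGet_nat hjP]
  simp only [hfix, if_neg hfix]
  exact pvRootT_eq_fuel hv hm hkn (by omega)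

theorem pvRootT_of_fix {P : List Int} {j : Nat} (hjP : j < P.length) (hfix : (P[j]'hjP) = (j : Int)) :
    pvRootT P j = (j : Int) := by
  unfold pvRootT
  rw [pvRoot, pvGet_nat hjP]
  simp [hfix]

theorem pvRootT_spec {n : Nat} {P : List Int} {w : Nat → Nat} (hv : pvValid n P) (hm : pvMeas w P) :
    ∀ c j, pvCB w n j = c → j < n →
      0 ≤ pvRootT P j ∧ pvRootT P j < (n : Int) ∧
      ∃ hr : (pvRootT P j).toNat < P.length, P[(pvRootT P j).toNat] = pvRootT P j ∧
        w (pvRootT P j).toNat ≤ w j := by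
  intro c
  induction c using Nat.strong_induction_on with
  | _ c IH =>
    intro j hc hj
    have hjP : j < P.length := by rw [hv.1]; exact hj
    by_cases hfix : (P[j]'hjP) = (j : Int)
    · rw [pvRootT_of_fix hjP hfix]
      exact ⟨by positivity, by exact_mod_cast hj, by simpa using hjP, by simpa using hfix, le_refl _⟩
    · rw [pvRootT_step hv hm hj hjP hfix]
      have hkn : (P[j]'hjP).toNat < n := pvValid_getElem_toNat_lt hv hjP
      have hwk : w (P[j]'hjP).toNat < w j := hm j hjP hfix
      have hck : pvCB w n (P[j]'hjP).toNat < pvCB w n j := pvCB_lt_of_lt hkn hwk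
      obtain ⟨h1, h2, hr, h3, h4⟩ := IH _ (hc ▸ hck) _ rfl hkn
      exact ⟨h1, h2, hr, h3, by omega⟩


theorem pvRootT_self_lt {n : Nat} {P : List Int} {w : Nat → Nat} (hv : pvValid n P) (hm : pvMeas w P)
    {j : Nat} (hj : j < n) :
    0 ≤ pvRootT P j ∧ pvRootT P j < (n : Int) ∧
      ∃ hr : (pvRootT P j).toNat < P.length, P[(pvRootT P j).toNat] = pvRootT P j ∧
        w (pvRootT P j).toNat ≤ w j :=
  pvRootT_spec hv hm _ j rfl hj

-- compression write: setting P[t] := root(t) preserves validity, the measure and every root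
theorem pvSet_root {n : Nat} {P : List Int} {w : Nat → Nat} (hv : pvValid n P) (hm : pvMeas w P)
    {t : Nat} (ht : t < n) :
    pvValid n (P.set t (pvRootT P t)) ∧ pvMeas w (P.set t (pvRootT P t)) ∧
      ∀ m, m < n → pvRootT (P.set t (pvRootT P t)) m = pvRootT P m := by
  have htP : t < P.length := by rw [hv.1]; exact ht
  obtain ⟨hr0, hrn, hrP, hrfix, hrw⟩ := pvRootT_self_lt hv hm ht
  set r := pvRootT P t with hrdef
  set Q := P.set t r with hQdef
  have hQlen : Q.length = P.length := by simp [hQdef]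
  have hQget : ∀ (j : Nat) (h : j < P.length), j ≠ t → Q[j]'(by omega) = P[j] := by
    intro j h hne
    exact List.getElem_set_ne (Ne.symm hne) (by simpa using h)
  have hQt : Q[t]'(by omega) = r := by simp [hQdef]
  have hvQ : pvValid n Q := by
    refine ⟨by rw [hQlen, hv.1], ?_⟩
    intro p hp
    rcases List.mem_or_eq_of_mem_set hp with h | h
    · exact hv.2 p h
    · subst h; exact ⟨hr0, hrn⟩
  have hmQ : pvMeas w Q := by
    intro j hjQ hne
    have hjP : j < P.length := by omega
    by_cases hjt : j = t
    · subst hjt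
      rw [hQt] at hne ⊢
      have hPj : P[j]'hjP ≠ (j : Int) := by
        intro hfix
        exact hne (by rw [hrdef, pvRootT_of_fix hjP hfix])
      have h1 : w r.toNat ≤ w (P[j]'hjP).toNat := by
        have hkn : (P[j]'hjP).toNat < n := pvValid_getElem_toNat_lt hv hjP
        have hstep := pvRootT_step hv hm (by omega : j < n) hjP hPj
        have := (pvRootT_self_lt hv hm hkn).2.2.choose_spec.2
        rw [← hstep] at this
        exact this
      have h2 : w (P[j]'hjP).toNat < w j := hm j hjP hPj
      omega
    · rw [hQget j hjP hjt] at hne ⊢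
      exact hm j hjP hne
  refine ⟨hvQ, hmQ, ?_⟩
  -- roots preserved; first the claim at t itself
  have hCt : pvRootT Q t = pvRootT P t := by
    by_cases hPfix : P[t]'htP = (t : Int)
    · have : r = (t : Int) := by rw [hrdef, pvRootT_of_fix htP hPfix]
      exact (pvRootT_of_fix (by omega) (hQt.trans this)).trans this.symm
    · have hrt : r ≠ (t : Int) := by
        intro hrt
        have h2 : w (P[t]'htP).toNat < w t := hm t htP hPfix
        have hkn : (P[t]'htP).toNat < n := pvValid_getElem_toNat_lt hv htP
        have hstep := pvRootT_step hv hm ht htP hPfix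
        have h1 := (pvRootT_self_lt hv hm hkn).2.2.choose_spec.2
        rw [← hstep, ← hrdef, hrt] at h1
        simp only [Int.toNat_natCast] at h1
        omega
      have hrtoNat : r.toNat ≠ t := by
        intro h; exact hrt (by omega)
      have hQr : Q[r.toNat]'(by omega) = r := by rw [hQget _ hrP hrtoNat]; exact hrfix
      have hstepQ : pvRootT Q t = pvRootT Q (Q[t]'(by omega : t < Q.length)).toNat :=
        pvRootT_step hvQ hmQ ht (by omega) (by rw [hQt]; exact hrt)
      rw [hstepQ]
      have : (Q[t]'(by omega : t < Q.length)).toNat = r.toNat := by rw [hQt]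
      rw [this, pvRootT_of_fix (by omega) (by rw [hQr]; omega)]
      omega
  -- now all m by strong induction on the measure count
  have main : ∀ c m, pvCB w n m = c → m < n → pvRootT Q m = pvRootT P m := by
    intro c
    induction c using Nat.strong_induction_on with
    | _ c IH =>
      intro m hc hmn
      by_cases hmt : m = t
      · subst hmt; exact hCt
      · have hmP : m < P.length := by rw [hv.1]; exact hmn
        have hQm : Q[m]'(by omega) = P[m]'hmP := hQget m hmP hmt
        by_cases hfix : P[m]'hmP = (m : Int)
        · rw [pvRootT_of_fix (by omega) (hQm.trans hfix), pvRootT_of_fix hmP hfix]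
        · have hkn : (P[m]'hmP).toNat < n := pvValid_getElem_toNat_lt hv hmP
          have hck : pvCB w n (P[m]'hmP).toNat < pvCB w n m := pvCB_lt_of_lt hkn (hm m hmP hfix)
          rw [pvRootT_step hvQ hmQ hmn (by omega) (by rw [hQm]; exact hfix),
              pvRootT_step hv hm hmn hmP hfix]
          have : (Q[m]'(by omega : m < Q.length)).toNat = (P[m]'hmP).toNat := by rw [hQm]
          rw [this]
          exact IH _ (hc ▸ hck) _ rfl hkn
  exact fun m hm' => main _ m rfl hm'

-- union write: setting root t to point at another root v re-roots exactly t's class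
theorem pvSet_union {n : Nat} {P : List Int} {w : Nat → Nat} (hv : pvValid n P) (hm : pvMeas w P)
    {t : Nat} (ht : t < n) (htP : t < P.length) (htfix : P[t] = (t : Int))
    {v : Int} (hv0 : 0 ≤ v) (hvn : v < (n : Int)) (hvP : v.toNat < P.length)
    (hvfix : P[v.toNat] = v) (hne : v ≠ (t : Int)) :
    pvValid n (P.set t v) ∧ pvMeas (fun i => if pvRootT P i = (t : Int) then w i + w v.toNat + 1 else w i) (P.set t v) ∧
      ∀ m, m < n → pvRootT (P.set t v) m = (if pvRootT P m = (t : Int) then v else pvRootT P m) := by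
  set w' : Nat → Nat := fun i => if pvRootT P i = (t : Int) then w i + w v.toNat + 1 else w i with hw'
  set Q := P.set t v with hQdef
  have hQlen : Q.length = P.length := by simp [hQdef]
  have hQget : ∀ (j : Nat) (h : j < P.length), j ≠ t → Q[j]'(by omega) = P[j] := by
    intro j h hne'
    exact List.getElem_set_ne (Ne.symm hne') (by simpa using h)
  have hQt : Q[t]'(by omega) = v := by simp [hQdef]
  have hvt : v.toNat ≠ t := fun h => hne (by omega)
  have hrootv : pvRootT P v.toNat = v := by
    have := pvRootT_of_fix hvP (by rw [hvfix]; omega)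
    rw [this]; omega
  have hroott : pvRootT P t = (t : Int) := pvRootT_of_fix htP htfix
  have hvQ : pvValid n Q := by
    refine ⟨by rw [hQlen, hv.1], ?_⟩
    intro p hp
    rcases List.mem_or_eq_of_mem_set hp with h | h
    · exact hv.2 p h
    · subst h; exact ⟨hv0, hvn⟩
  have hmQ : pvMeas w' Q := by
    intro j hjQ hne'
    have hjP : j < P.length := by omega
    by_cases hjt : j = t
    · subst hjt
      rw [hQt] at hne' ⊢
      have h1 : w' v.toNat = w v.toNat := by
        simp only [hw', hrootv]
        rw [if_neg hne]
      have h2 : w' j = w j + w v.toNat + 1 := by simp [hw', hroott]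
      omega
    · rw [hQget j hjP hjt] at hne' ⊢
      have hstep : pvRootT P j = pvRootT P (P[j]'hjP).toNat :=
        pvRootT_step hv hm (by rw [hv.1] at hjP; exact hjP) hjP hne'
      have hwlt : w (P[j]'hjP).toNat < w j := hm j hjP hne'
      simp only [hw', ← hstep]
      split_ifs <;> omega
  refine ⟨hvQ, hmQ, ?_⟩
  have hCt : pvRootT Q t = v := by
    have hQtne : Q[t]'(by omega) ≠ (t : Int) := by rw [hQt]; exact hne
    have hstepQ := pvRootT_step hvQ hmQ ht (by omega) hQtne
    rw [hstepQ]
    have heq : (Q[t]'(by omega : t < Q.length)).toNat = v.toNat := by rw [hQt]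
    rw [heq]
    have hQv : Q[v.toNat]'(by omega) = v := by rw [hQget _ hvP hvt]; exact hvfix
    rw [pvRootT_of_fix (by omega) (by rw [hQv]; omega)]
    omega
  have main : ∀ c m, pvCB w' n m = c → m < n →
      pvRootT Q m = (if pvRootT P m = (t : Int) then v else pvRootT P m) := by
    intro c
    induction c using Nat.strong_induction_on with
    | _ c IH =>
      intro m hc hmn
      by_cases hmt : m = t
      · subst hmt; rw [hCt, hroott, if_pos rfl]
      · have hmP : m < P.length := by rw [hv.1]; exact hmn
        have hQm : Q[m]'(by omega) = P[m]'hmP := hQget m hmP hmt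
        by_cases hfix : P[m]'hmP = (m : Int)
        · have h1 : pvRootT Q m = (m : Int) := pvRootT_of_fix (by omega) (hQm.trans hfix)
          have h2 : pvRootT P m = (m : Int) := pvRootT_of_fix hmP hfix
          rw [h1, h2, if_neg (by exact_mod_cast fun h => hmt (by exact_mod_cast h))]
        · have hkn : (P[m]'hmP).toNat < n := pvValid_getElem_toNat_lt hv hmP
          have hck : pvCB w' n (P[m]'hmP).toNat < pvCB w' n m := by
            apply pvCB_lt_of_lt hkn
            have h3 := hmQ m (by omega) (by rw [hQm]; exact hfix)
            rw [hQm] at h3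
            exact h3
          have hiff : pvRootT P (P[m]'hmP).toNat = pvRootT P m :=
            (pvRootT_step hv hm hmn hmP hfix).symm
          rw [pvRootT_step hvQ hmQ hmn (by omega) (by rw [hQm]; exact hfix),
              pvRootT_step hv hm hmn hmP hfix]
          have heq : (Q[m]'(by omega : m < Q.length)).toNat = (P[m]'hmP).toNat := by rw [hQm]
          rw [heq]
          exact IH _ (hc ▸ hck) _ rfl hkn
  exact fun m hm' => main _ m rfl hm'

theorem pvFindA_length (fuel : Nat) (P : List Int) (x : Int) : (pvFindA fuel P x).1.length = P.length := by
  induction fuel generalizing P x with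
  | zero => rfl
  | succ f IH =>
    rw [pvFindA]
    cases hg : PySem.List.pyGet? P x with
    | none => rfl
    | some p =>
      by_cases hpx : p ≠ x
      · simp only [hpx, if_pos, ne_eq, not_false_eq_true, if_true]
        have := IH P p
        simp [PySem.List.length_pySetD, this]
      · simp [hpx]

-- find with path compression returns the root and preserves every root
theorem pvFindA_succ_some {f : Nat} {P : List Int} {x p : Int}
    (h : PySem.List.pyGet? P x = some p) :
    pvFindA (f+1) P x =
      if p ≠ x then (PySem.List.pySetD (pvFindA f P p).1 x (pvFindA f P p).2, (pvFindA f P p).2)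
      else (P, x) := by
  rw [pvFindA, h]

theorem pvFindA_spec {n : Nat} {P : List Int} {w : Nat → Nat} (hv : pvValid n P) (hm : pvMeas w P) :
    ∀ c j, pvCB w n j = c → j < n → ∀ f, pvCB w n j < f →
      (pvFindA (f+1) P (j : Int)).2 = pvRootT P j ∧
      pvValid n (pvFindA (f+1) P (j : Int)).1 ∧ pvMeas w (pvFindA (f+1) P (j : Int)).1 ∧
      ∀ m, m < n → pvRootT (pvFindA (f+1) P (j : Int)).1 m = pvRootT P m := by
  intro c
  induction c using Nat.strong_induction_on with
  | _ c IH =>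
    intro j hc hj f hf
    have hjP : j < P.length := by rw [hv.1]; exact hj
    rw [pvFindA_succ_some (pvGet_nat hjP)]
    by_cases hfix : P[j]'hjP = (j : Int)
    · have hnn : ¬ (P[j]'hjP ≠ (j : Int)) := by simp [hfix]
      rw [if_neg hnn]
      exact ⟨(pvRootT_of_fix hjP hfix).symm, hv, hm, fun m _ => rfl⟩
    · have hkn : (P[j]'hjP).toNat < n := pvValid_getElem_toNat_lt hv hjP
      have hck : pvCB w n (P[j]'hjP).toNat < pvCB w n j := pvCB_lt_of_lt hkn (hm j hjP hfix)
      obtain ⟨f, rfl⟩ : ∃ f', f = f' + 1 := ⟨f - 1, by omega⟩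
      have hcast : P[j]'hjP = (((P[j]'hjP).toNat : Nat) : Int) := by
        have := pvValid_getElem hv hjP; omega
      have IHk := IH _ (hc ▸ hck) _ rfl hkn f (by omega)
      set k := (P[j]'hjP).toNat with hk
      set q := pvFindA (f+1) P (k : Int) with hq
      have hqeq : pvFindA (f+1) P (P[j]'hjP) = q := by rw [hcast]
      simp only [ne_eq, hfix, not_false_eq_true, if_true, hqeq]
      obtain ⟨hq2, hqv, hqm, hqroots⟩ := IHk
      have hstep : pvRootT P j = pvRootT P k := pvRootT_step hv hm hj hjP hfix
      have hqlen : q.1.length = P.length := by rw [hq]; exact pvFindA_length _ _ _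
      have hjq : j < q.1.length := by omega
      have hr : q.2 = pvRootT q.1 j := by rw [hq2, hqroots j hj, hstep]
      have hsetD : ∀ v : Int, PySem.List.pySetD q.1 (j : Int) v = q.1.set j v := fun v =>
        PySem.List.pySetD_natCast q.1 j v
      obtain ⟨hv', hm', hroots'⟩ := pvSet_root (w := w) hqv hqm hj
      constructor
      · simp only [hq2, hstep]
      refine ⟨?_, ?_, ?_⟩
      · simpa only [hsetD, hr] using hv'
      · simpa only [hsetD, hr] using hm'
      · intro m hmn
        have := hroots' m hmn
        rw [hsetD, hr]
        rw [this, hqroots m hmn]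

-- wrapper with the fuel the ports use
theorem pvFindA_run {n : Nat} {P : List Int} {w : Nat → Nat} (hv : pvValid n P) (hm : pvMeas w P)
    {j : Nat} (hj : j < n) :
    (pvFindA (P.length + 2) P (j : Int)).2 = pvRootT P j ∧
    pvValid n (pvFindA (P.length + 2) P (j : Int)).1 ∧ pvMeas w (pvFindA (P.length + 2) P (j : Int)).1 ∧
    ∀ m, m < n → pvRootT (pvFindA (P.length + 2) P (j : Int)).1 m = pvRootT P m := by
  have hcb : pvCB w n j < P.length + 1 := by
    have := pvCB_le (w := w) (n := n) (j := j); have := hv.1; omega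
  exact pvFindA_spec hv hm _ j rfl hj (P.length + 1) hcb

theorem pvNorm_lt {n : Nat} {x : Int} (h1 : -(n : Int) ≤ x) (h2 : x < (n : Int)) : pvNorm n x < n := by
  unfold pvNorm
  split_ifs <;> omega

theorem pvIdx_norm {n : Nat} {x : Int} (h1 : -(n : Int) ≤ x) (h2 : x < (n : Int)) :
    PySem.List.pyIdx? n x = some (pvNorm n x) := by
  unfold PySem.List.pyIdx? pvNorm
  split_ifs <;> simp <;> omega

theorem pvGet_norm {n : Nat} {P : List Int} (hlen : P.length = n) {x : Int}
    (h1 : -(n : Int) ≤ x) (h2 : x < (n : Int)) :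
    PySem.List.pyGet? P x = some (P[pvNorm n x]'(by rw [hlen]; exact pvNorm_lt h1 h2)) := by
  unfold PySem.List.pyGet?
  have hidx : PySem.List.pyIdx? P.length x = some (pvNorm n x) := by
    rw [hlen]; exact pvIdx_norm h1 h2
  rw [hidx]
  simp [List.getElem?_eq_getElem (show pvNorm n x < P.length by rw [hlen]; exact pvNorm_lt h1 h2)]

-- a negative in-range argument to find behaves as its normalized index
theorem pvFindA_neg {n : Nat} {P : List Int} (hv : pvValid n P) {x : Int}
    (h1 : -(n : Int) ≤ x) (hx : x < 0) (f : Nat) :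
    pvFindA (f + 2) P x = pvFindA (f + 2) P ((pvNorm n x : Nat) : Int) := by
  have h2 : x < (n : Int) := by omega
  have hjn : pvNorm n x < n := pvNorm_lt h1 h2
  have hjP : pvNorm n x < P.length := by rw [hv.1]; exact hjn
  set j := pvNorm n x with hj
  have hget : PySem.List.pyGet? P x = some (P[j]'hjP) := pvGet_norm hv.1 h1 h2
  have hgetj : PySem.List.pyGet? P ((j : Nat) : Int) = some (P[j]'hjP) := pvGet_nat hjP
  have hpx : P[j]'hjP ≠ x := by
    have := pvValid_getElem hv hjP; omega
  have hidxx : PySem.List.pyIdx? P.length x = some j := by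
    rw [hv.1]; exact pvIdx_norm h1 h2
  have hidxj : PySem.List.pyIdx? P.length ((j : Nat) : Int) = some j := by
    rw [hv.1]; exact (pvIdx_norm (by omega) (by exact_mod_cast hjn)).trans (by simp [pvNorm])
  rw [pvFindA_succ_some hget, pvFindA_succ_some hgetj, if_pos hpx]
  by_cases hfix : P[j]'hjP = (j : Int)
  · rw [if_neg (by simp [hfix])]
    have hinner : pvFindA (f+1) P (P[j]'hjP) = (P, P[j]'hjP) := by
      rw [pvFindA_succ_some (show PySem.List.pyGet? P (P[j]'hjP) = some (P[j]'hjP) by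
            rw [hfix, hgetj, hfix])]
      simp
    rw [hinner]
    have hsetd : PySem.List.pySetD P x (P[j]'hjP) = P := by
      unfold PySem.List.pySetD PySem.List.pySet?
      rw [hidxx]
      simp only [Option.map_some, Option.getD_some]
      exact List.set_getElem_self hjP
    rw [hsetd, hfix]
  · rw [if_pos (by simp [hfix])]
    have hlen2 : (pvFindA (f+1) P (P[j]'hjP)).1.length = P.length := pvFindA_length _ _ _
    have hsame : PySem.List.pySetD (pvFindA (f+1) P (P[j]'hjP)).1 x (pvFindA (f+1) P (P[j]'hjP)).2
        = PySem.List.pySetD (pvFindA (f+1) P (P[j]'hjP)).1 ((j : Nat) : Int) (pvFindA (f+1) P (P[j]'hjP)).2 := by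
      unfold PySem.List.pySetD PySem.List.pySet?
      rw [hlen2, hidxx, hidxj]
    rw [hsame]

theorem pvFindA_normed {n : Nat} {P : List Int} (hv : pvValid n P) {x : Int}
    (h1 : -(n : Int) ≤ x) (h2 : x < (n : Int)) :
    pvFindA (P.length + 2) P x = pvFindA (P.length + 2) P ((pvNorm n x : Nat) : Int) := by
  by_cases h0 : 0 ≤ x
  · have : ((pvNorm n x : Nat) : Int) = x := by unfold pvNorm; rw [if_pos h0]; omega
    rw [this]
  · exact pvFindA_neg hv h1 (by omega) P.length

theorem pvUnionA_spec {n : Nat} {P : List Int} {w : Nat → Nat} (hv : pvValid n P) (hm : pvMeas w P)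
    {a b : Int} (ha1 : -(n : Int) ≤ a) (ha2 : a < (n : Int)) (hb1 : -(n : Int) ≤ b) (hb2 : b < (n : Int)) :
    pvValid n (pvUnionA P a b) ∧ (∃ w', pvMeas w' (pvUnionA P a b)) ∧
      ∀ m, m < n → pvRootT (pvUnionA P a b) m =
        (if pvRootT P m = pvRootT P (pvNorm n b) then pvRootT P (pvNorm n a) else pvRootT P m) := by
  have hna : pvNorm n a < n := pvNorm_lt ha1 ha2
  have hnb : pvNorm n b < n := pvNorm_lt hb1 hb2
  have hU : pvUnionA P a b =
      (if (pvFindA (P.length + 2) P a).2 ≠ (pvFindA ((pvFindA (P.length + 2) P a).1.length + 2) (pvFindA (P.length + 2) P a).1 b).2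
       then PySem.List.pySetD (pvFindA ((pvFindA (P.length + 2) P a).1.length + 2) (pvFindA (P.length + 2) P a).1 b).1
              (pvFindA ((pvFindA (P.length + 2) P a).1.length + 2) (pvFindA (P.length + 2) P a).1 b).2
              (pvFindA (P.length + 2) P a).2
       else (pvFindA ((pvFindA (P.length + 2) P a).1.length + 2) (pvFindA (P.length + 2) P a).1 b).1) := rfl
  rw [hU, pvFindA_normed hv ha1 ha2]
  obtain ⟨hr1, hv1, hm1, hroots1⟩ := pvFindA_run hv hm hna
  set F1 := pvFindA (P.length + 2) P ((pvNorm n a : Nat) : Int) with hF1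
  set Q1 := F1.1 with hQ1
  have hQ1len : Q1.length = P.length := pvFindA_length _ _ _
  rw [pvFindA_normed hv1 hb1 hb2]
  obtain ⟨hr2, hv2, hm2, hroots2⟩ := pvFindA_run hv1 hm1 hnb
  set F2 := pvFindA (Q1.length + 2) Q1 ((pvNorm n b : Nat) : Int) with hF2
  set Q2 := F2.1 with hQ2def
  have hr2' : F2.2 = pvRootT Q1 (pvNorm n b) := hr2
  have hv2' : pvValid n Q2 := hv2
  have hm2' : pvMeas w Q2 := hm2
  have hroots2' : ∀ m, m < n → pvRootT Q2 m = pvRootT Q1 m := hroots2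
  have hrootsP : ∀ m, m < n → pvRootT Q2 m = pvRootT P m := by
    intro m hmn; rw [hroots2' m hmn, hroots1 m hmn]
  have hF12 : F1.2 = pvRootT P (pvNorm n a) := hr1
  have hF22 : F2.2 = pvRootT P (pvNorm n b) := by rw [hr2', hroots1 _ hnb]
  by_cases hrr : F1.2 ≠ F2.2
  · rw [if_pos hrr]
    obtain ⟨hb0, hbn, hbP, hbfix, _⟩ := pvRootT_self_lt hv2' hm2' hnb
    obtain ⟨ha0, han, haP, hafix, _⟩ := pvRootT_self_lt hv2' hm2' hna
    have e2 : pvRootT Q2 (pvNorm n b) = F2.2 := by rw [hF22, hrootsP _ hnb]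
    have e1 : pvRootT Q2 (pvNorm n a) = F1.2 := by rw [hF12, hrootsP _ hna]
    rw [← e1, ← e2]
    set rA := pvRootT Q2 (pvNorm n a) with hrA
    set rB := pvRootT Q2 (pvNorm n b) with hrB
    have hrr' : rA ≠ rB := fun h => hrr ((e1.symm.trans h).trans e2)
    have hsetD : PySem.List.pySetD Q2 rB rA = Q2.set rB.toNat rA :=
      PySem.List.pySetD_of_nonneg Q2 rA hb0
    have htcast : ((rB.toNat : Nat) : Int) = rB := by omega
    have htfix : Q2[rB.toNat]'(by omega) = ((rB.toNat : Nat) : Int) := by rw [htcast]; exact hbfix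
    have hne' : rA ≠ ((rB.toNat : Nat) : Int) := by rw [htcast]; exact hrr'
    obtain ⟨hvU, hmU, hrootsU⟩ := pvSet_union hv2' hm2' (show rB.toNat < n by omega) (by omega)
      htfix ha0 han (by omega) hafix hne'
    rw [hsetD]
    refine ⟨hvU, ⟨_, hmU⟩, ?_⟩
    intro m hmn
    rw [hrootsU m hmn, htcast]
    rw [hrootsP m hmn, hrB, hrA, hrootsP _ hnb, hrootsP _ hna]
  · rw [if_neg hrr]
    refine ⟨hv2', ⟨_, hm2'⟩, ?_⟩
    intro m hmn
    rw [hrootsP m hmn]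
    rw [not_not] at hrr
    rw [hF12, hF22] at hrr
    split_ifs with h
    · rw [h, ← hrr]
    · rfl

theorem pvGetRoots {n : Nat} {P : List Int} {x : Int}
    (h1 : -(n : Int) ≤ x) (h2 : x < (n : Int)) :
    PySem.List.pyGet? ((List.range n).map (fun j => pvRootT P j)) x
      = some (pvRootT P (pvNorm n x)) := by
  have hlen : ((List.range n).map (fun j => pvRootT P j)).length = n := by simp
  have hnx : pvNorm n x < n := pvNorm_lt h1 h2
  rw [pvGet_norm hlen h1 h2]
  congr 1
  simp

theorem pvPhase1 {n : Nat} :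
    ∀ (prs : List (List Int)) (P r : List Int) (w : Nat → Nat),
    pvValid n P → pvMeas w P →
    (∀ pr ∈ prs, pr.length = 2 ∧ ∀ x ∈ pr, PySem.Raise.InRange n x) →
    r = (List.range n).map (fun j => pvRootT P j) →
    pvValid n (prs.foldl pvUnionRow P) ∧
    (∃ w', pvMeas w' (prs.foldl pvUnionRow P)) ∧
    prs.foldl (fun rep pr =>
        match pr with
        | [a, b] =>
          match PySem.List.pyGet? rep a, PySem.List.pyGet? rep b with
          | some ra, some rb =>
            if ra ≠ rb then rep.map (fun r => if r = rb then ra else r) else rep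
          | _, _ => rep
        | _ => rep) r
      = (List.range n).map (fun j => pvRootT (prs.foldl pvUnionRow P) j) := by
  intro prs
  induction prs with
  | nil =>
    intro P r w hv hm _ hr
    exact ⟨hv, ⟨w, hm⟩, hr⟩
  | cons pr t IH =>
    intro P r w hv hm hpre hr
    obtain ⟨hlen2, hin⟩ := hpre pr List.mem_cons_self
    obtain ⟨a, b, rfl⟩ : ∃ a b, pr = [a, b] := by
      match pr, hlen2 with
      | [a, b], _ => exact ⟨a, b, rfl⟩
    obtain ⟨ha1, ha2⟩ := hin a (by simp)
    obtain ⟨hb1, hb2⟩ := hin b (by simp)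
    simp only [List.foldl_cons]
    have hrow : pvUnionRow P [a, b] = pvUnionA P a b := rfl
    rw [hrow]
    obtain ⟨hvU, ⟨w', hmU⟩, hrootsU⟩ := pvUnionA_spec hv hm ha1 ha2 hb1 hb2
    subst hr
    simp only [pvGetRoots ha1 ha2, pvGetRoots hb1 hb2]
    by_cases hab : pvRootT P (pvNorm n a) ≠ pvRootT P (pvNorm n b)
    · rw [if_pos hab]
      apply IH _ _ w' hvU hmU (fun q hq => hpre q (List.mem_cons_of_mem _ hq))
      rw [List.map_map]
      apply List.map_congr_left
      intro j hj
      rw [List.mem_range] at hj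
      simp only [Function.comp_apply]
      rw [hrootsU j hj]
    · rw [if_neg hab]
      rw [not_not] at hab
      apply IH _ _ w' hvU hmU (fun q hq => hpre q (List.mem_cons_of_mem _ hq))
      apply List.map_congr_left
      intro j hj
      rw [List.mem_range] at hj
      rw [hrootsU j hj]
      by_cases hc : pvRootT P j = pvRootT P (pvNorm n b)
      · rw [if_pos hc, hc, hab]
      · rw [if_neg hc]

theorem pvPhase2 {n : Nat} {PA : List Int} :
    ∀ (l : List Int), (∀ i ∈ l, ∃ j : Nat, j < n ∧ i = (j : Int)) →
    ∀ (P : List Int) (d : PySem.Dict Int (List Int)) (w : Nat → Nat),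
    pvValid n P → pvMeas w P → (∀ m, m < n → pvRootT P m = pvRootT PA m) →
    (l.foldl (fun (st : List Int × PySem.Dict Int (List Int)) i =>
        let fr := pvFindA (st.1.length + 2) st.1 i
        (fr.1, st.2.modify fr.2 [] (fun v => v ++ [i]))) (P, d)).2
      = l.foldl (fun d i => d.modify (pvRootT PA i.toNat) [] (fun v => v ++ [i])) d := by
  intro l
  induction l with
  | nil => intro _ P d w _ _ _; rfl
  | cons i t IH =>
    intro hmem P d w hv hm hroots
    obtain ⟨j, hj, rfl⟩ := hmem i List.mem_cons_self
    simp only [List.foldl_cons]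
    obtain ⟨hr, hv', hm', hroots'⟩ := pvFindA_run hv hm hj
    rw [hr, hroots j hj, Int.toNat_natCast]
    exact IH (fun x hx => hmem x (List.mem_cons_of_mem _ hx)) _ _ w hv' hm'
      (fun m hmn => by rw [hroots' m hmn]; exact hroots m hmn)

-- the dict built by B's grouping loop, in range-indexed form
theorem pvDictB_eq {n : Nat} (PA : List Int) :
    (PySem.List.enumerate ((List.range n).map (fun j => pvRootT PA j))).foldl
        (fun (d : PySem.Dict Int (List Int)) p => d.modify p.2 [] (fun v => v ++ [p.1]))
        PySem.Dict.empty
      = (List.range n).foldl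
        (fun (d : PySem.Dict Int (List Int)) j => d.modify (pvRootT PA j) [] (fun v => v ++ [(j : Int)]))
        PySem.Dict.empty := by
  rw [PySem.List.enumerate_eq_map_pyRange _ 0]
  have hlen : PySem.List.len ((List.range n).map (fun j => pvRootT PA j)) = (n : Int) := by
    simp [PySem.List.len]
  rw [hlen, PySem.List.pyRange_zero_natCast, List.foldl_map, List.foldl_map]
  apply PySem.List.foldl_congr_mem
  intro acc x hx
  rw [List.mem_range] at hx
  rw [PySem.List.pyGetD_natCast, PySem.List.getD_map_range _ _ _ _ hx]

-- the dict built by A's grouping loop equals B's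
theorem pvDictA_eq {n : Nat} (PA : List Int) :
    (PySem.List.pyRange 0 (n : Int)).foldl
        (fun (d : PySem.Dict Int (List Int)) i => d.modify (pvRootT PA i.toNat) [] (fun v => v ++ [i]))
        PySem.Dict.empty
      = (List.range n).foldl
        (fun (d : PySem.Dict Int (List Int)) j => d.modify (pvRootT PA j) [] (fun v => v ++ [(j : Int)]))
        PySem.Dict.empty := by
  rw [PySem.List.pyRange_zero_natCast, List.foldl_map]
  apply PySem.List.foldl_congr_mem
  intro acc x hx
  rw [Int.toNat_natCast]

-- every component list the grouping dict stores is strictly increasing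
theorem pvValues_sorted {n : Nat} (PA : List Int) :
    ∀ v ∈ ((List.range n).foldl
        (fun (d : PySem.Dict Int (List Int)) j => d.modify (pvRootT PA j) [] (fun v => v ++ [(j : Int)]))
        PySem.Dict.empty).values, List.Pairwise (· < ·) v := by
  intro v hv
  set D := (List.range n).foldl
      (fun (d : PySem.Dict Int (List Int)) j => d.modify (pvRootT PA j) [] (fun v => v ++ [(j : Int)]))
      PySem.Dict.empty with hD
  have hnodup : D.keys.Nodup := by
    rw [hD]
    exact PySem.Dict.nodup_keys_foldl_modify_key (List.range n) (fun j => pvRootT PA j) []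
      (fun d j => fun v => v ++ [(j : Int)]) PySem.Dict.empty PySem.Dict.nodup_keys_empty
  rw [PySem.Dict.values_eq_map_keys D hnodup []] at hv
  obtain ⟨k, _, rfl⟩ := List.mem_map.mp hv
  -- closed form of the stored list
  have hpair : D = ((List.range n).map (fun j => (pvRootT PA j, (j : Int)))).foldl
      (fun (d : PySem.Dict Int (List Int)) p => d.modify p.1 [] (fun v => v ++ [p.2]))
      PySem.Dict.empty := by
    rw [hD, List.foldl_map]
  have hgetD : D.getD k [] = (((List.range n).map (fun j => (pvRootT PA j, (j : Int)))).filter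
      (fun p => p.1 == k)).map (fun p => p.2) := by
    rw [hpair, PySem.Dict.getD_foldl_modify_append]
    simp
  rw [hgetD, List.filter_map, List.map_map]
  apply List.Pairwise.map (fun j => ((j : Nat) : Int)) (fun a b h => by exact_mod_cast h)
  exact List.Pairwise.sublist List.filter_sublist
    (List.pairwise_lt_range.imp (fun {a b} h => by show ((a : Int) < (b : Int)); exact_mod_cast h))

theorem pvInit (n : Nat) :
    pvValid n (PySem.List.pyRange 0 (n : Int)) ∧ pvMeas (fun _ => 0) (PySem.List.pyRange 0 (n : Int)) ∧
      ∀ j, (h : j < (PySem.List.pyRange 0 (n : Int)).length) →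
        (PySem.List.pyRange 0 (n : Int))[j] = (j : Int) := by
  rw [PySem.List.pyRange_zero_natCast]
  have hget : ∀ j, (h : j < ((List.range n).map (fun k : Nat => (k : Int))).length) →
      ((List.range n).map (fun k : Nat => (k : Int)))[j] = (j : Int) := by
    intro j h
    have hj : j < n := by simpa using h
    simp
  refine ⟨⟨by simp, ?_⟩, ?_, hget⟩
  · intro p hp
    obtain ⟨k, hk, rfl⟩ := List.mem_map.mp hp
    rw [List.mem_range] at hk
    constructor <;> omega
  · intro j h hne
    exact absurd (hget j h) hne

theorem pvMain (s : String) (pairs : List (List Int))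
    (hpre : ∀ pr ∈ pairs, pr.length = 2 ∧ ∀ x ∈ pr, PySem.Raise.InRange s.length x) :
    smallestStringWithSwaps s pairs = smallestStringWithSwaps_alt s pairs := by
  have hn : PySem.Str.len s = (s.toList.length : Int) := rfl
  set n := s.toList.length with hndef
  have hpre' : ∀ pr ∈ pairs, pr.length = 2 ∧ ∀ x ∈ pr, PySem.Raise.InRange n x := by
    intro pr hpr
    obtain ⟨h1, h2⟩ := hpre pr hpr
    refine ⟨h1, fun x hx => ?_⟩
    rw [hndef, String.length_toList]
    exact h2 x hx
  obtain ⟨hv0, hm0, hget0⟩ := pvInit n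
  have hroot0 : ∀ j, j < n → pvRootT (PySem.List.pyRange 0 (n : Int)) j = (j : Int) := by
    intro j hj
    have hjP : j < (PySem.List.pyRange 0 (n : Int)).length := by rw [hv0.1]; exact hj
    exact pvRootT_of_fix hjP (hget0 j hjP)
  have hr0 : PySem.List.pyRange 0 (n : Int)
      = (List.range n).map (fun j => pvRootT (PySem.List.pyRange 0 (n : Int)) j) := by
    conv_lhs => rw [PySem.List.pyRange_zero_natCast]
    apply List.map_congr_left
    intro j hj
    exact (hroot0 j (List.mem_range.mp hj)).symm
  obtain ⟨hvA, ⟨wA, hmA⟩, hrep⟩ :=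
    pvPhase1 pairs (PySem.List.pyRange 0 (n : Int)) (PySem.List.pyRange 0 (n : Int))
      (fun _ => 0) hv0 hm0 hpre' hr0
  set PA := pairs.foldl pvUnionRow (PySem.List.pyRange 0 (n : Int)) with hPA
  have hA : smallestStringWithSwaps s pairs
      = String.ofList (((PySem.List.pyRange 0 (n : Int)).foldl
          (fun (st : List Int × PySem.Dict Int (List Int)) i =>
            let fr := pvFindA (st.1.length + 2) st.1 i
            (fr.1, st.2.modify fr.2 [] (fun v => v ++ [i])))
          (PA, PySem.Dict.empty)).2.values.foldl
          (fun res indices =>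
            ((PySem.List.sorted indices (fun i => i)).zip
              (PySem.List.sorted (indices.map (fun i => PySem.List.pyGetD res i ' ')) (fun c => c))).foldl
              (fun res p => PySem.List.pySetD res p.1 p.2) res) s.toList) := rfl
  have hB : smallestStringWithSwaps_alt s pairs
      = String.ofList (((PySem.List.enumerate (pairs.foldl (fun rep pr =>
          match pr with
          | [a, b] =>
            match PySem.List.pyGet? rep a, PySem.List.pyGet? rep b with
            | some ra, some rb =>
              if ra ≠ rb then rep.map (fun r => if r = rb then ra else r) else rep
            | _, _ => rep
          | _ => rep) (PySem.List.pyRange 0 (n : Int)))).foldl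
          (fun (d : PySem.Dict Int (List Int)) p => d.modify p.2 [] (fun v => v ++ [p.1]))
          PySem.Dict.empty).values.foldl
          (fun res indices =>
            (indices.zip (PySem.List.sorted (indices.map (fun j => PySem.List.pyGetD res j ' ')) (fun c => c))).foldl
              (fun res p => PySem.List.pySetD res p.1 p.2) res) s.toList) := rfl
  rw [hA, hB, hrep]
  -- A's grouping loop equals the range-indexed dict fold
  have hl : ∀ i ∈ PySem.List.pyRange 0 (n : Int), ∃ j : Nat, j < n ∧ i = (j : Int) := by
    intro i hi
    rw [PySem.List.pyRange_zero_natCast] at hi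
    obtain ⟨j, hj, rfl⟩ := List.mem_map.mp hi
    exact ⟨j, List.mem_range.mp hj, rfl⟩
  have hdA := pvPhase2 (PA := PA) (PySem.List.pyRange 0 (n : Int)) hl PA PySem.Dict.empty wA
    hvA hmA (fun m _ => rfl)
  rw [hdA, pvDictA_eq, pvDictB_eq]
  -- the per-component rewriting loops agree because every stored list is increasing
  apply congrArg
  apply PySem.List.foldl_congr_mem
  intro acc v hvv
  have hsorted := pvValues_sorted (n := n) PA v hvv
  simp only [PySem.List.sorted_eq_self_of_pairwise v (fun i => i) (hsorted.imp le_of_lt)]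

-- ===== VERDICT (by name: the statement is the Claim_ definition above) =====
theorem smallestStringWithSwaps_spec : Claim_equal_smallestStringWithSwaps := by
  intro s pairs _ hpre
  show smallestStringWithSwaps s pairs = smallestStringWithSwaps_alt s pairs
  exact pvMain s pairs hpre
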